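-- pv_equiv track=rewrite | github.com/Buran11/Urban-University-Homework | module_2/module_2_hard.py | get_generated_password
-- ===== SOURCE A (Python) =====
-- def get_generated_password(input_number):
--     temp_list = []
--     sum_index_values = 1
--     count_nested_list = 0
--     for i in range(1, input_number):
--         count_nested_list += 1
--         for j in range(count_nested_list, input_number):
--             sum_index_values = i + j
--             if input_number % sum_index_values == 0:
--                 if i != j:
--                     temp_list.extend([i, j])
--     return temp_list
-- ===== SOURCE B (Python) =====
-- def get_generated_password(input_number):
--     n = input_number
--     if n < 3:
--         return []
--     divisors = [d for d in range(1, n + 1) if n % d == 0]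
--     result = []
--     for i in range(1, n):
--         for d in divisors:
--             j = d - i
--             if i < j < n:
--                 result.append(i)
--                 result.append(j)
--     return result
-- ===== Notes on version B (the rewrite author's own statement) =====
-- stated objective: faster
-- what changed: B precomputes the sorted list of divisors of n once and, for each i, scans only that divisor list (j = d - i) instead of scanning every j in range(i, n), turning the O(n^2) double range scan into O(n + n*d(n)).
import Mathlib
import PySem

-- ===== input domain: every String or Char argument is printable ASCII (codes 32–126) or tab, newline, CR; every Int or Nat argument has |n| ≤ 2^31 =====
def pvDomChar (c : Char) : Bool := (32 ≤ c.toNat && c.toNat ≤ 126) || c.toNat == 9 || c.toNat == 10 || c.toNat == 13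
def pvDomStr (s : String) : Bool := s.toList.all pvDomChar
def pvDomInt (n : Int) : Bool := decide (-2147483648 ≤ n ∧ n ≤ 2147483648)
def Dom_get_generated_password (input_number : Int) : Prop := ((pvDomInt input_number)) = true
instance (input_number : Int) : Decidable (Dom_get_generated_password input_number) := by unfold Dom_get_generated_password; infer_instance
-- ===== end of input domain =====

-- B precomputes the divisor list of n once and, for each i, scans only the divisors
-- (j = d - i) instead of all j — an asymptotically faster algorithm with the same output.

-- ===== PORT A =====
def get_generated_password (input_number : Int) : List Int :=
  ((PySem.List.pyRange 1 input_number 1).foldl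
    (fun (st : List Int × Int × Int) i =>
      let count_nested_list := st.2.2 + 1
      let inner := (PySem.List.pyRange count_nested_list input_number 1).foldl
        (fun (st2 : List Int × Int) j =>
          let sum_index_values := i + j
          if PySem.Int.mod input_number sum_index_values = 0 then
            if i ≠ j then (st2.1 ++ [i, j], sum_index_values)
            else (st2.1, sum_index_values)
          else (st2.1, sum_index_values))
        (st.1, st.2.1)
      (inner.1, inner.2, count_nested_list))
    ([], 1, 0)).1

-- ===== PORT B =====
def get_generated_password_alt (input_number : Int) : List Int :=
  if input_number < 3 then []
  else
    let divisors := (PySem.List.pyRange 1 (input_number + 1) 1).filter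
      (fun d => PySem.Int.mod input_number d == 0)
    (PySem.List.pyRange 1 input_number 1).foldl
      (fun acc i =>
        divisors.foldl
          (fun acc2 d =>
            let j := d - i
            if i < j ∧ j < input_number then acc2 ++ [i, j] else acc2)
          acc)
      []

-- ===== PRECONDITION & SPEC =====
def Spec_get_generated_password (input_number : Int) (out : List Int) : Prop := out = get_generated_password_alt input_number
instance (input_number : Int) (out : List Int) : Decidable (Spec_get_generated_password input_number out) := by unfold Spec_get_generated_password; infer_instance

-- ===== CLAIM (what is proved, stated in full; the proofs are below) =====
def Claim_equal_get_generated_password : Prop := ∀ (input_number : Int), Dom_get_generated_password input_number → Spec_get_generated_password input_number (get_generated_password input_number)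

-- ===== LEMMAS AND PROOFS =====

-- A's i-th row, as a filter of the inner range
def pvRowA (n i : Int) : List Int :=
  ((PySem.List.pyRange i n 1).filter
      (fun j => decide (PySem.Int.mod n (i + j) = 0) && decide (i ≠ j))).flatMap
    (fun j => [i, j])

def pvDivs (n : Int) : List Int :=
  (PySem.List.pyRange 1 (n + 1) 1).filter (fun d => PySem.Int.mod n d == 0)

-- B's i-th row, as a filter of the divisor list
def pvRowB (n i : Int) : List Int :=
  ((pvDivs n).filter (fun d => decide (i < d - i) && decide (d - i < n))).flatMap
    (fun d => [i, d - i])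

lemma pvInnerA (n i : Int) (l tl : List Int) (s : Int) :
    (l.foldl
        (fun (st2 : List Int × Int) j =>
          let sum_index_values := i + j
          if PySem.Int.mod n sum_index_values = 0 then
            if i ≠ j then (st2.1 ++ [i, j], sum_index_values)
            else (st2.1, sum_index_values)
          else (st2.1, sum_index_values))
        (tl, s)).1
      = tl ++ (l.filter (fun j => decide (PySem.Int.mod n (i + j) = 0) && decide (i ≠ j))).flatMap
          (fun j => [i, j]) := by
  induction l generalizing tl s with
  | nil => simp
  | cons x xs ih =>
    simp only [List.foldl_cons, List.filter_cons]
    by_cases h3 : i = x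
    · subst h3
      by_cases h1 : PySem.Int.mod n (i + i) = 0 <;> simp [h1] <;>
        simpa using ih tl (i + i)
    · by_cases h1 : PySem.Int.mod n (i + x) = 0
      · simp [h1, h3]
        simpa using ih (tl ++ [i, x]) (i + x)
      · simp [h1, h3]
        simpa using ih tl (i + x)

lemma pvOuterA (n : Int) (k : Nat) : ∀ (a : Int) (tl : List Int) (s c : Int), c + 1 = a → (n - a).toNat ≤ k →
    ((PySem.List.pyRange a n 1).foldl
        (fun (st : List Int × Int × Int) i =>
          let count_nested_list := st.2.2 + 1
          let inner := (PySem.List.pyRange count_nested_list n 1).foldl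
            (fun (st2 : List Int × Int) j =>
              let sum_index_values := i + j
              if PySem.Int.mod n sum_index_values = 0 then
                if i ≠ j then (st2.1 ++ [i, j], sum_index_values)
                else (st2.1, sum_index_values)
              else (st2.1, sum_index_values))
            (st.1, st.2.1)
          (inner.1, inner.2, count_nested_list))
        (tl, s, c)).1
      = tl ++ (PySem.List.pyRange a n 1).flatMap (pvRowA n) := by
  induction k with
  | zero =>
    intro a tl s c hc h
    rw [PySem.List.pyRange_one_eq_nil (by omega)]
    simp
  | succ k ih =>
    intro a tl s c hc h
    by_cases hle : n ≤ a
    · rw [PySem.List.pyRange_one_eq_nil hle]; simp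
    · rw [PySem.List.pyRange_one_cons (by omega)]
      simp only [List.foldl_cons, List.flatMap_cons]
      simp only [hc]
      rw [ih (a + 1) _ _ a (by omega) (by omega)]
      rw [pvInnerA n a (PySem.List.pyRange a n 1) tl s]
      simp [pvRowA]

lemma pvA_eq (n : Int) :
    get_generated_password n = (PySem.List.pyRange 1 n 1).flatMap (pvRowA n) := by
  have := pvOuterA n (n - 1).toNat 1 [] 1 0 (by omega) (by omega)
  simpa [get_generated_password] using this

lemma pvInnerB (n i : Int) (l acc : List Int) :
    (l.foldl
        (fun acc2 d =>
          let j := d - i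
          if i < j ∧ j < n then acc2 ++ [i, j] else acc2)
        acc)
      = acc ++ (l.filter (fun d => decide (i < d - i) && decide (d - i < n))).flatMap
          (fun d => [i, d - i]) := by
  induction l generalizing acc with
  | nil => simp
  | cons x xs ih =>
    simp only [List.foldl_cons, List.filter_cons]
    by_cases h1 : i < x - i <;> by_cases h2 : x - i < n <;> simp [h1, h2, ih]

lemma pvB_eq (n : Int) (h : ¬ n < 3) :
    get_generated_password_alt n = (PySem.List.pyRange 1 n 1).flatMap (pvRowB n) := by
  simp only [get_generated_password_alt, if_neg h]
  have : ∀ (acc : List Int) (i : Int),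
      ((pvDivs n).foldl
        (fun acc2 d =>
          let j := d - i
          if i < j ∧ j < n then acc2 ++ [i, j] else acc2) acc)
      = acc ++ pvRowB n i := fun acc i => pvInnerB n i _ acc
  calc (PySem.List.pyRange 1 n 1).foldl
        (fun acc i => ((PySem.List.pyRange 1 (n + 1) 1).filter
            (fun d => PySem.Int.mod n d == 0)).foldl
          (fun acc2 d =>
            let j := d - i
            if i < j ∧ j < n then acc2 ++ [i, j] else acc2) acc) []
      = (PySem.List.pyRange 1 n 1).foldl (fun acc i => acc ++ pvRowB n i) [] := by
        exact PySem.List.foldl_congr_mem _ _ _ _ (fun acc i _ => this acc i)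
    _ = [] ++ (PySem.List.pyRange 1 n 1).flatMap (pvRowB n) :=
        PySem.List.foldl_append_eq_flatMap _ _ _
    _ = _ := by simp

lemma pvLists_eq (n i : Int) (hn : 3 ≤ n) (hi : 1 ≤ i) :
    ((pvDivs n).filter (fun d => decide (i < d - i) && decide (d - i < n))).map (fun d => d - i)
      = (PySem.List.pyRange i n 1).filter
          (fun j => decide (PySem.Int.mod n (i + j) = 0) && decide (i ≠ j)) := by
  have hdivs : (pvDivs n).Pairwise (· < ·) :=
    List.Pairwise.filter _ (PySem.List.pairwise_lt_pyRange_one 1 (n + 1))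
  have s1 : (((pvDivs n).filter (fun d => decide (i < d - i) && decide (d - i < n))).map
      (fun d => d - i)).Pairwise (· < ·) := by
    rw [List.pairwise_map]
    exact (hdivs.filter _).imp (fun h => by omega)
  have s2 : ((PySem.List.pyRange i n 1).filter
      (fun j => decide (PySem.Int.mod n (i + j) = 0) && decide (i ≠ j))).Pairwise (· < ·) :=
    List.Pairwise.filter _ (PySem.List.pairwise_lt_pyRange_one i n)
  have hmem : ∀ a, a ∈ ((pvDivs n).filter
        (fun d => decide (i < d - i) && decide (d - i < n))).map (fun d => d - i)
      ↔ a ∈ (PySem.List.pyRange i n 1).filter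
          (fun j => decide (PySem.Int.mod n (i + j) = 0) && decide (i ≠ j)) := by
    intro a
    simp only [List.mem_map, List.mem_filter, pvDivs, PySem.List.mem_pyRange_one,
      Bool.and_eq_true, decide_eq_true_eq, beq_iff_eq]
    constructor
    · rintro ⟨d, ⟨⟨⟨hd1, hd2⟩, hdvd⟩, hlt, hltn⟩, rfl⟩
      refine ⟨⟨by omega, by omega⟩, ?_, by omega⟩
      rwa [show i + (d - i) = d by ring]
    · rintro ⟨⟨h1, h2⟩, hmod, hne⟩
      refine ⟨i + a, ⟨⟨⟨by omega, ?_⟩, hmod⟩, by omega, by omega⟩, by ring⟩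
      have hdvd : (i + a) ∣ n := (PySem.Int.mod_eq_zero_iff_dvd n (i + a)).mp hmod
      have := Int.le_of_dvd (by omega) hdvd
      omega
  have hperm := (List.perm_ext_iff_of_nodup
    (s1.imp fun h => ne_of_lt h) (s2.imp fun h => ne_of_lt h)).mpr hmem
  exact hperm.eq_of_pairwise (fun a b _ _ h1 h2 => absurd h2 (not_lt.mpr h1.le)) s1 s2

lemma pvRow_eq (n i : Int) (hn : 3 ≤ n) (hi : 1 ≤ i) : pvRowA n i = pvRowB n i := by
  unfold pvRowA pvRowB
  rw [← pvLists_eq n i hn hi, List.flatMap_map]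

-- ===== VERDICT (by name: the statement is the Claim_ definition above) =====
theorem get_generated_password_spec : Claim_equal_get_generated_password := by
  intro n _
  unfold Spec_get_generated_password
  by_cases h : n < 3
  · rw [get_generated_password_alt, if_pos h, pvA_eq]
    rcases (by omega : n ≤ 1 ∨ n = 2) with h2 | h2
    · rw [PySem.List.pyRange_one_eq_nil (by omega)]; rfl
    · subst h2; decide
  · rw [pvA_eq, pvB_eq n h]
    exact List.flatMap_congr fun i hi =>
      pvRow_eq n i (by omega) (by exact ((PySem.List.mem_pyRange_one).mp hi).1)
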